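-- pv_equiv track=rewrite | github.com/xxxlphz/python-excerciss | recursive .py | has_digit
-- ===== SOURCE A (Python) =====
-- def has_digit(s):
--     if s[0].isdigit() == True:
--         return True
--     else:
--         if len(s) <= 1:
--             return False
--         else:
--             return has_digit(s[1:])
-- ===== SOURCE B (Python) =====
-- def has_digit(s):
--     i = 0
--     while True:
--         if s[i].isdigit():
--             return True
--         i += 1
--         if i >= len(s):
--             return False
-- ===== Notes on version B (the rewrite author's own statement) =====
-- stated objective: alternative
-- what changed: Replaces the tail recursion on ever-shorter slices s[1:] with an index-based while loop over the original string, keeping the same s[0]/s[i] indexing (so the empty string still raises IndexError in both).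
import Mathlib
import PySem

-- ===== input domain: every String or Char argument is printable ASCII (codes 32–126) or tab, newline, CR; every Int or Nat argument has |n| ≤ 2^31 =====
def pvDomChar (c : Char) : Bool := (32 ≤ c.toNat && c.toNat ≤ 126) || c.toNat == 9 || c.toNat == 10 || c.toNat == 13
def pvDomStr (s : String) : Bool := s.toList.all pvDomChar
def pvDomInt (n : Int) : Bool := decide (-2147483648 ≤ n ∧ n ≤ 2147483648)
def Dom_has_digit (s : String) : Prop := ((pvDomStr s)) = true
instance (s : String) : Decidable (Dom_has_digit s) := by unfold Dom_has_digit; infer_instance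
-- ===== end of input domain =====

-- B replaces A's tail recursion on slices s[1:] with an index-based loop over the same string (same s[0]/s[i] indexing, so "" is excluded by Pre_ where both raise IndexError).

-- ===== PORT A =====
-- A's recursion: test s[0], then if len(s) <= 1 return False else recurse on s[1:]
def hasDigitAGo : List Char → Bool
  | [] => false  -- unreachable under Pre_ (s[0] raises IndexError on "")
  | c :: rest =>
    if PySem.Chars.isdigit c then true
    else if (c :: rest).length ≤ 1 then false
    else hasDigitAGo rest

def has_digit (s : String) : Bool := hasDigitAGo s.toList

-- ===== PORT B =====
-- B's loop: i = 0; test s[i]; i += 1; stop with False once i >= len(s)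
def hasDigitBGo (cs : List Char) (i : Nat) : Bool :=
  match PySem.List.pyGet? cs (i : Int) with
  | none => false  -- IndexError in Python; under Pre_ only i = 0 on "" would reach this
  | some c =>
    if PySem.Chars.isdigit c then true
    else if cs.length ≤ i + 1 then false
    else hasDigitBGo cs (i + 1)
termination_by cs.length - i
decreasing_by simp_all; omega

def has_digit_alt (s : String) : Bool := hasDigitBGo s.toList 0

-- ===== PRECONDITION & SPEC =====
-- Pre_ excludes only the empty string, on which A (and B) raise IndexError via s[0].
def Pre_has_digit (s : String) : Prop := s ≠ ""
instance (s : String) : Decidable (Pre_has_digit s) := by unfold Pre_has_digit; infer_instance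
def pvWitness_has_digit : String := "a7"
def Spec_has_digit (s : String) (out : Bool) : Prop := out = has_digit_alt s
instance (s : String) (out : Bool) : Decidable (Spec_has_digit s out) := by unfold Spec_has_digit; infer_instance

-- ===== CLAIM (what is proved, stated in full; the proofs are below) =====
def Claim_equal_has_digit : Prop := ∀ (s : String), Dom_has_digit s → Pre_has_digit s → Spec_has_digit s (has_digit s)

-- ===== LEMMAS AND PROOFS =====
theorem hasDigit_go_eq (cs : List Char) (i : Nat) (h : i < cs.length) :
    hasDigitAGo (cs.drop i) = hasDigitBGo cs i := by
  have hd : cs.drop i = cs[i] :: cs.drop (i + 1) := List.drop_eq_getElem_cons h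
  rw [hd, hasDigitAGo, hasDigitBGo]
  have hget : PySem.List.pyGet? cs (i : Int) = some cs[i] := by
    simp [PySem.List.pyGet?, PySem.List.pyIdx?, h]
  rw [hget]
  by_cases hdig : PySem.Chars.isdigit cs[i]
  · simp [hdig]
  · simp only [hdig, Bool.false_eq_true, if_false]
    by_cases hlen : cs.length ≤ i + 1
    · have : cs.drop (i + 1) = [] := List.drop_eq_nil_of_le hlen
      simp [this, hlen]
    · have hlt : i + 1 < cs.length := by omega
      have : ¬ ((cs[i] :: cs.drop (i + 1)).length ≤ 1) := by
        simp [List.length_drop]; omega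
      simp only [this, if_false, hlen, if_false]
      exact hasDigit_go_eq cs (i + 1) hlt
termination_by cs.length - i

-- ===== VERDICT (by name: the statement is the Claim_ definition above) =====
theorem has_digit_spec : Claim_equal_has_digit := by
  intro s _ hpre
  have hne : s.toList ≠ [] := by
    simpa [String.toList_eq_nil_iff] using hpre
  have hlen : 0 < s.toList.length := List.length_pos_iff.mpr hne
  unfold Spec_has_digit has_digit has_digit_alt
  have := hasDigit_go_eq s.toList 0 hlen
  simpa using this
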